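-- pv_equiv track=rewrite | github.com/roteml8/python_codes | boolean_conjunction_predictor.py | consistency_algorithm
-- ===== SOURCE A (Python) =====
-- def consistency_algorithm(X, Y, d):
--     h0 = []
--     for j in range(d):
--         h0.append(1)  # activate xi
--         h0.append(1)  # activate not(xi)
--     h = h0
--     num_of_examples = len(X)
--     for k in range(num_of_examples):
--         current_example = X[k]
--         if Y[k] == 1 and get_prediction(h, current_example, d) == 0:
--             for j in range(d):
--                 if current_example[j] == 1:
--                     h[j + 1] = 0  # deactivate not(xi)
--                 if current_example[j] == 0:
--                     h[j] = 0  # deactivate xi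
--     return h
--
-- def get_prediction(h, example, d):
--     for i in range(d):
--         if h[i] == 1 and example[i] == 0:
--             return 0
--         if h[i+1] == 1 and example[i] == 1:
--             return 0
--     return 1
-- ===== SOURCE B (Python) =====
-- def consistency_algorithm(X, Y, d):
--     # Prediction guard dropped: when the current hypothesis already predicts 1,
--     # the update only clears bits that are already 0, so updating on every
--     # positive example gives the same hypothesis.
--     h = [1] * (2 * d)
--     for x, y in zip(X, Y):
--         if y == 1:
--             for j in range(d):
--                 if x[j] == 1:
--                     h[j + 1] = 0
--                 elif x[j] == 0:
--                     h[j] = 0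
--     return h
-- ===== Notes on version B (the rewrite author's own statement) =====
-- stated objective: simpler
-- what changed: B drops the get_prediction helper and its per-example prediction scan entirely: since an update on an example the hypothesis already predicts 1 on only clears bits that are already 0, B simply applies the clearing update to every positive example while iterating over zip(X, Y).
import Mathlib
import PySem

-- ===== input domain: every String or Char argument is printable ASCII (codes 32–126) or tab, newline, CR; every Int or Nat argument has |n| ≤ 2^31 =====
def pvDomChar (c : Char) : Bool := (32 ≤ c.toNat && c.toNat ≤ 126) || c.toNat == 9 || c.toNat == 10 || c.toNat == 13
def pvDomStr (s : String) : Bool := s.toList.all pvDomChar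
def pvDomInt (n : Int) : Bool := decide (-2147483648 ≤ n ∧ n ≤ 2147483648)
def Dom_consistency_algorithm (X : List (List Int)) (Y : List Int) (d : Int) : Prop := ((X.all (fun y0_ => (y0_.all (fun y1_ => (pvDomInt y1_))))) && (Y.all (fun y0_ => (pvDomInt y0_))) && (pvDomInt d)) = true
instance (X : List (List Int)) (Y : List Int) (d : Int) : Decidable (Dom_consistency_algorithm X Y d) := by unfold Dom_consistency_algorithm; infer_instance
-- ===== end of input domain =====

-- B drops the redundant get_prediction scan: whenever the hypothesis already predicts 1,
-- the update only clears bits that are already 0, so B updates on every positive example (simpler).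

-- ===== PORT A =====
-- helper get_prediction: the 'for i in range(d)' loop with early returns
def get_prediction_go (h ex_ : List Int) : Nat → Nat → Int
  | 0, _ => 1
  | rem + 1, i =>
    if h.getD i 0 = 1 ∧ ex_.getD i 0 = 0 then 0
    else if h.getD (i + 1) 0 = 1 ∧ ex_.getD i 0 = 1 then 0
    else get_prediction_go h ex_ rem (i + 1)

def get_prediction (h ex_ : List Int) (d : Int) : Int :=
  get_prediction_go h ex_ d.toNat 0

-- the h0-building loop: each of the d iterations contributes two 1-entries
def build_h0 : Nat → List Int
  | 0 => []
  | j + 1 => 1 :: 1 :: build_h0 j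

def consistency_algorithm (X : List (List Int)) (Y : List Int) (d : Int) : List Int :=
  let h0 := build_h0 d.toNat
  (List.range X.length).foldl (fun h k =>
    let ex := X.getD k []
    if Y.getD k 0 = 1 ∧ get_prediction h ex d = 0 then
      (List.range d.toNat).foldl (fun h j =>
        let h1 := if ex.getD j 0 = 1 then h.set (j + 1) 0 else h
        if ex.getD j 0 = 0 then h1.set j 0 else h1) h
    else h) h0

-- ===== PORT B =====
def consistency_algorithm_alt (X : List (List Int)) (Y : List Int) (d : Int) : List Int :=
  (X.zip Y).foldl (fun h p =>
    if p.2 = 1 then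
      (List.range d.toNat).foldl (fun h j =>
        if p.1.getD j 0 = 1 then h.set (j + 1) 0
        else if p.1.getD j 0 = 0 then h.set j 0
        else h) h
    else h) (List.replicate (2 * d).toNat 1)

-- ===== PRECONDITION & SPEC =====
-- Pre_ excludes exactly the inputs on which Python A raises IndexError:
-- Y shorter than X, or a positive example row shorter than d.
def Pre_consistency_algorithm (X : List (List Int)) (Y : List Int) (d : Int) : Prop :=
  X.length ≤ Y.length ∧ ∀ p ∈ X.zip Y, p.2 = 1 → d ≤ (p.1.length : Int)
instance (X : List (List Int)) (Y : List Int) (d : Int) : Decidable (Pre_consistency_algorithm X Y d) := by unfold Pre_consistency_algorithm; infer_instance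

def pvWitness_consistency_algorithm : List (List Int) × List Int × Int := ([[1, 0], [0, 1]], [1, 0], 2)

def Spec_consistency_algorithm (X : List (List Int)) (Y : List Int) (d : Int) (out : List Int) : Prop := out = consistency_algorithm_alt X Y d
instance (X : List (List Int)) (Y : List Int) (d : Int) (out : List Int) : Decidable (Spec_consistency_algorithm X Y d out) := by unfold Spec_consistency_algorithm; infer_instance

-- ===== CLAIM (what is proved, stated in full; the proofs are below) =====
def Claim_equal_consistency_algorithm : Prop := ∀ (X : List (List Int)) (Y : List Int) (d : Int), Dom_consistency_algorithm X Y d → Pre_consistency_algorithm X Y d → Spec_consistency_algorithm X Y d (consistency_algorithm X Y d)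

-- ===== LEMMAS AND PROOFS =====

-- the h0 building loop yields the all-ones list of length 2*d
lemma pv_init_eq (n : Nat) : build_h0 n = List.replicate (2 * n) 1 := by
  induction n with
  | zero => rfl
  | succ n ih =>
      rw [build_h0, ih, show 2 * (n + 1) = 1 + (1 + 2 * n) by omega,
        List.replicate_add, List.replicate_add]
      rfl

-- A's inner update step (two independent ifs) equals B's if/elif step
lemma pv_step_eq (ex : List Int) :
    (fun (h : List Int) (j : Nat) =>
      let h1 := if ex.getD j 0 = 1 then h.set (j + 1) 0 else h
      if ex.getD j 0 = 0 then h1.set j 0 else h1)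
    = (fun (h : List Int) (j : Nat) =>
      if ex.getD j 0 = 1 then h.set (j + 1) 0
      else if ex.getD j 0 = 0 then h.set j 0
      else h) := by
  funext h j
  dsimp only
  split_ifs <;> first | rfl | omega

-- get_prediction returning 1 records, for every scanned index, that no update bit fires
lemma pv_pred_one (h ex : List Int) :
    ∀ (rem i : Nat), get_prediction_go h ex rem i = 1 →
      ∀ t, t < rem →
        ¬(h.getD (i + t) 0 = 1 ∧ ex.getD (i + t) 0 = 0) ∧
        ¬(h.getD (i + t + 1) 0 = 1 ∧ ex.getD (i + t) 0 = 1) := by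
  intro rem
  induction rem with
  | zero => intro i _ t ht; omega
  | succ rem ih =>
      intro i hp t ht
      rw [get_prediction_go] at hp
      split_ifs at hp with c1 c2
      · exact absurd hp (by norm_num)
      · exact absurd hp (by norm_num)
      · cases t with
        | zero =>
            constructor
            · simpa using c1
            · simpa using c2
        | succ t =>
            have h' := ih (i + 1) hp t (by omega)
            rw [show i + (t + 1) = i + 1 + t from by omega]
            exact h'

-- setting an entry to 0 is a no-op when it is not 1 and all entries are 0/1
lemma pv_set_noop (h : List Int) (i : Nat) (hv : ∀ x ∈ h, x = 0 ∨ x = 1)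
    (hne : ¬ h.getD i 0 = 1) : h.set i 0 = h := by
  apply List.ext_getElem (by simp)
  intro j hj hj'
  rw [List.getElem_set]
  split
  · next heq =>
      subst heq
      rcases hv _ (List.getElem_mem hj') with h0 | h1
      · exact h0.symm
      · exact absurd (by rw [List.getD_eq_getElem _ _ hj']; exact h1) hne
  · rfl

-- a fold whose steps preserve an invariant preserves it
lemma pv_foldl_inv {α β : Type} (P : α → Prop) (f : α → β → α) (l : List β) (a : α)
    (ha : P a) (hf : ∀ a b, P a → P (f a b)) : P (l.foldl f a) := by
  induction l generalizing a with
  | nil => exact ha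
  | cons b l ih => exact ih _ (hf a b ha)

-- B's update step keeps all entries in {0,1}
lemma pv_inv_step (ex : List Int) (h : List Int) (j : Nat) (hv : ∀ x ∈ h, x = 0 ∨ x = 1) :
    ∀ x ∈ (if ex.getD j 0 = 1 then h.set (j + 1) 0
           else if ex.getD j 0 = 0 then h.set j 0
           else h), x = 0 ∨ x = 1 := by
  intro x hx
  split_ifs at hx with c1 c0
  · rcases List.mem_or_eq_of_mem_set hx with hmem | h0
    · exact hv x hmem
    · exact Or.inl h0
  · rcases List.mem_or_eq_of_mem_set hx with hmem | h0
    · exact hv x hmem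
    · exact Or.inl h0
  · exact hv x hx

-- B's whole update is a no-op when the hypothesis already predicts 1
lemma pv_updB_noop (ex h : List Int) (hv : ∀ x ∈ h, x = 0 ∨ x = 1) :
    ∀ n : Nat,
      (∀ t, t < n →
        ¬(h.getD t 0 = 1 ∧ ex.getD t 0 = 0) ∧
        ¬(h.getD (t + 1) 0 = 1 ∧ ex.getD t 0 = 1)) →
      (List.range n).foldl (fun h j =>
        if ex.getD j 0 = 1 then h.set (j + 1) 0
        else if ex.getD j 0 = 0 then h.set j 0
        else h) h = h := by
  intro n
  induction n with
  | zero => intro _; simp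
  | succ n ih =>
      intro hcond
      rw [List.range_succ, List.foldl_append, ih (fun t ht => hcond t (by omega))]
      simp only [List.foldl_cons, List.foldl_nil]
      obtain ⟨c0, c1⟩ := hcond n (by omega)
      split_ifs with e1 e0
      · exact pv_set_noop h (n + 1) hv (fun hh => c1 ⟨hh, e1⟩)
      · exact pv_set_noop h n hv (fun hh => c0 ⟨hh, e0⟩)
      · rfl

-- get_prediction_go only returns 0 or 1
lemma pv_pred_cases (h ex : List Int) : ∀ (rem i : Nat),
    get_prediction_go h ex rem i = 0 ∨ get_prediction_go h ex rem i = 1 := by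
  intro rem
  induction rem with
  | zero => intro i; simp [get_prediction_go]
  | succ rem ih =>
      intro i
      rw [get_prediction_go]
      split_ifs
      · exact Or.inl rfl
      · exact Or.inl rfl
      · exact ih (i + 1)

-- the main loop of A equals B's fold over the zipped suffixes
lemma pv_main (X : List (List Int)) (Y : List Int) (d : Int) :
    ∀ (m k : Nat) (h : List Int), m = X.length - k → (∀ x ∈ h, x = 0 ∨ x = 1) →
      (List.range' k m).foldl (fun h k =>
        let ex := X.getD k []
        if Y.getD k 0 = 1 ∧ get_prediction h ex d = 0 then
          (List.range d.toNat).foldl (fun h j =>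
            let h1 := if ex.getD j 0 = 1 then h.set (j + 1) 0 else h
            if ex.getD j 0 = 0 then h1.set j 0 else h1) h
        else h) h
      = ((X.drop k).zip (Y.drop k)).foldl (fun h p =>
          if p.2 = 1 then
            (List.range d.toNat).foldl (fun h j =>
              if p.1.getD j 0 = 1 then h.set (j + 1) 0
              else if p.1.getD j 0 = 0 then h.set j 0
              else h) h
          else h) h := by
  intro m
  induction m with
  | zero =>
      intro k h hk _
      have hdrop : X.drop k = [] := List.drop_eq_nil_of_le (by omega)
      simp [hdrop]
  | succ m ih =>
      intro k h hk hv
      have hkX : k < X.length := by omega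
      rw [List.range'_succ, List.foldl_cons]
      have hXd : X.drop k = X[k] :: X.drop (k + 1) := List.drop_eq_getElem_cons hkX
      have hXg : X.getD k [] = X[k] := List.getD_eq_getElem X [] hkX
      by_cases hkY : k < Y.length
      · have hYd : Y.drop k = Y[k] :: Y.drop (k + 1) := List.drop_eq_getElem_cons hkY
        have hYg : Y.getD k 0 = Y[k] := List.getD_eq_getElem Y 0 hkY
        rw [hXd, hYd]
        simp only [List.zip_cons_cons, List.foldl_cons]
        rw [hXg, hYg]
        by_cases hy : Y[k] = 1
        · rcases pv_pred_cases h X[k] d.toNat 0 with hp | hp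
          · -- prediction 0: both sides update, by the same step function
            rw [if_pos ⟨hy, hp⟩, if_pos hy, pv_step_eq X[k]]
            exact ih (k + 1) _ (by omega)
              (pv_foldl_inv _ _ _ _ hv (fun a b hab => pv_inv_step X[k] a b hab))
          · -- prediction 1: A skips, B's update is a no-op
            have hnoop := pv_updB_noop X[k] h hv d.toNat
              (fun t ht => by
                have h' := pv_pred_one h X[k] d.toNat 0 hp t ht
                simpa using h')
            rw [if_neg (by simp [get_prediction, hp]), if_pos hy, hnoop]
            exact ih (k + 1) h (by omega) hv
        · rw [if_neg (by simp [hy]), if_neg hy]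
          exact ih (k + 1) h (by omega) hv
      · -- Y exhausted: A's guard reads the default 0, B's zip is empty
        have hYd : Y.drop k = [] := List.drop_eq_nil_of_le (by omega)
        have hYd' : Y.drop (k + 1) = [] := List.drop_eq_nil_of_le (by omega)
        have hYg : Y.getD k 0 = 0 := by apply List.getD_eq_default; omega
        dsimp only
        rw [hYg, if_neg (by simp)]
        rw [ih (k + 1) h (by omega) hv, hYd, hYd']
        simp

-- ===== VERDICT (by name: the statement is the Claim_ definition above) =====
theorem consistency_algorithm_spec : Claim_equal_consistency_algorithm := by
  intro X Y d _ _
  unfold Spec_consistency_algorithm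
  simp only [consistency_algorithm, consistency_algorithm_alt]
  rw [pv_init_eq d.toNat]
  have h2 : (2 * d).toNat = 2 * d.toNat := by omega
  rw [h2, show List.range X.length = List.range' 0 X.length from List.range_eq_range']
  have hmain := pv_main X Y d X.length 0 (List.replicate (2 * d.toNat) 1) (by omega)
    (fun x hx => Or.inr (List.eq_of_mem_replicate hx))
  simp only [List.drop_zero] at hmain
  exact hmain
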